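-- pv_equiv track=rewrite | github.com/George-Nyamao/Spotify-Playlist-Curator | add_genres_to_playlist.py | clean_genres
-- ===== SOURCE A (Python) =====
-- def clean_genres(genres, artist_name, track_name, album_name):
--     """
--     Remove artist names, track names, and album names from genre list
--     """
--     # Convert to lowercase for comparison
--     artist_lower = artist_name.lower()
--     track_lower = track_name.lower()
--     album_lower = album_name.lower()
--
--     # Split into words for partial matching
--     artist_words = set(artist_lower.split())
--     track_words = set(track_lower.split())
--     album_words = set(album_lower.split())
--
--     cleaned_genres = []
--
--     for genre in genres:
--         genre_lower = genre.lower()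
--
--         # Skip if genre contains artist name, track name, or album name
--         if (artist_lower in genre_lower or
--             track_lower in genre_lower or
--             album_lower in genre_lower or
--             any(word in genre_lower for word in artist_words if len(word) > 2) or
--             any(word in genre_lower for word in track_words if len(word) > 2) or
--             any(word in genre_lower for word in album_words if len(word) > 2)):
--             continue
--
--         cleaned_genres.append(genre)
--
--     return cleaned_genres
-- ===== SOURCE B (Python) =====
-- def clean_genres(genres, artist_name, track_name, album_name):
--     """
--     Remove artist names, track names, and album names from genre list
--     """
--     # Staged sieve: pair each genre with its lowercase form once, then loop
--     # over the blocking patterns (each full lowercased name plus its words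
--     # longer than 2 chars), filtering the survivor list at every stage.
--     survivors = [(g, g.lower()) for g in genres]
--     for name in (artist_name, track_name, album_name):
--         n = name.lower()
--         for pat in [n] + [w for w in n.split() if len(w) > 2]:
--             survivors = [(g, gl) for (g, gl) in survivors if pat not in gl]
--     return [g for g, _ in survivors]
-- ===== Notes on version B (the rewrite author's own statement) =====
-- stated objective: alternative
-- what changed: B inverts the loop structure: instead of A's single pass over genres with a six-branch predicate re-deriving names/word-sets per genre, B lowercases each genre once into (genre, lower) pairs and runs a staged sieve whose outer loop is over the blocking pattern strings, each stage filtering the survivor list; order is preserved because every stage is a stable filter.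
import Mathlib
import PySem

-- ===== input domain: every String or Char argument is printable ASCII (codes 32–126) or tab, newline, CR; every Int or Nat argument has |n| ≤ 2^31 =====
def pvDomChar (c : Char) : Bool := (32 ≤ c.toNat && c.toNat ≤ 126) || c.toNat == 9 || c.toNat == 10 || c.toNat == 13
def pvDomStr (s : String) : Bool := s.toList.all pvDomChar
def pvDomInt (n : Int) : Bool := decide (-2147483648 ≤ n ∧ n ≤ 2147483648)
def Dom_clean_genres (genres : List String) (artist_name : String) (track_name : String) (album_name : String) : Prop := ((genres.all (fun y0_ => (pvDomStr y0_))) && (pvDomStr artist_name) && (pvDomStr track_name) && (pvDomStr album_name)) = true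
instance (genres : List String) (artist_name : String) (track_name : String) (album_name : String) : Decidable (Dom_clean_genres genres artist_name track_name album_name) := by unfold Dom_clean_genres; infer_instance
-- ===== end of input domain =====

-- B inverts the loop structure: it lowercases each genre once into (genre, lower) pairs and
-- runs a staged sieve whose outer loop is over the blocking pattern strings, each stage
-- filtering the survivor list; objective: alternative decomposition of the same cost.

-- ===== PORT A =====
def clean_genres (genres : List String) (artist_name : String) (track_name : String) (album_name : String) : List String :=
  let artist_lower := PySem.Str.lower artist_name
  let track_lower := PySem.Str.lower track_name
  let album_lower := PySem.Str.lower album_name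
  let artist_words := PySem.Set.ofList (PySem.Str.split₀ artist_lower)
  let track_words := PySem.Set.ofList (PySem.Str.split₀ track_lower)
  let album_words := PySem.Set.ofList (PySem.Str.split₀ album_lower)
  genres.foldl (fun cleaned_genres genre =>
    let genre_lower := PySem.Str.lower genre
    if (PySem.Str.isIn artist_lower genre_lower ||
        PySem.Str.isIn track_lower genre_lower ||
        PySem.Str.isIn album_lower genre_lower ||
        artist_words.any (fun word => decide (2 < PySem.Str.len word) && PySem.Str.isIn word genre_lower) ||
        track_words.any (fun word => decide (2 < PySem.Str.len word) && PySem.Str.isIn word genre_lower) ||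
        album_words.any (fun word => decide (2 < PySem.Str.len word) && PySem.Str.isIn word genre_lower))
    then cleaned_genres
    else cleaned_genres ++ [genre]) []

-- ===== PORT B =====
def clean_genres_alt (genres : List String) (artist_name : String) (track_name : String) (album_name : String) : List String :=
  let survivors0 := genres.map (fun g => (g, PySem.Str.lower g))
  let survivors := [artist_name, track_name, album_name].foldl (fun survivors name =>
    let n := PySem.Str.lower name
    ([n] ++ (PySem.Str.split₀ n).filter (fun w => decide (2 < PySem.Str.len w))).foldl
      (fun s pat => s.filter (fun p => !PySem.Str.isIn pat p.2)) survivors) survivors0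
  survivors.map (fun p => p.1)

-- ===== PRECONDITION & SPEC =====
def Spec_clean_genres (genres : List String) (artist_name : String) (track_name : String) (album_name : String) (out : List String) : Prop := out = clean_genres_alt genres artist_name track_name album_name
instance (genres : List String) (artist_name : String) (track_name : String) (album_name : String) (out : List String) : Decidable (Spec_clean_genres genres artist_name track_name album_name out) := by unfold Spec_clean_genres; infer_instance

-- ===== CLAIM (what is proved, stated in full; the proofs are below) =====
def Claim_equal_clean_genres : Prop := ∀ (genres : List String) (artist_name : String) (track_name : String) (album_name : String), Dom_clean_genres genres artist_name track_name album_name → Spec_clean_genres genres artist_name track_name album_name (clean_genres genres artist_name track_name album_name)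

-- ===== LEMMAS AND PROOFS =====

-- A's `any` iterates a Python set of the words; existence over the set equals existence over the list.
theorem any_set_ofList (xs : List String) (p : String → Bool) :
    (PySem.Set.ofList xs).any p = xs.any p := by
  rw [Bool.eq_iff_iff]
  simp [List.any_eq_true, PySem.Set.mem_ofList]

-- a chain of filters is one filter by the conjunction of the predicates
theorem foldl_filter {α β : Type} (fs : List α) (q : α → β → Bool) (l : List β) :
    fs.foldl (fun s f => s.filter (q f)) l = l.filter (fun b => fs.all (fun f => q f b)) := by
  induction fs generalizing l with
  | nil => simp
  | cons f fs ih =>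
    simp only [List.foldl_cons, ih, List.filter_filter, List.all_cons]
    apply List.filter_congr
    intro b _
    rw [Bool.and_comm]

-- one stage of B's sieve (full name + long words of one name) blocks exactly A's two tests for that name
theorem block_eq (n lg : String) (ws : List String) :
    ([n] ++ ws.filter (fun w => decide (2 < PySem.Str.len w))).all (fun pat => !PySem.Str.isIn pat lg)
    = !(PySem.Str.isIn n lg ||
        (PySem.Set.ofList ws).any (fun w => decide (2 < PySem.Str.len w) && PySem.Str.isIn w lg)) := by
  rw [Bool.eq_iff_iff]
  simp [any_set_ofList, List.all_filter, List.all_eq_true]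
  intro _
  constructor
  · intro h x hx hlen
    rcases h x hx with h1 | h2
    · omega
    · exact h2
  · intro h x hx
    by_cases hl : 2 < x.length
    · exact Or.inr (h x hx hl)
    · exact Or.inl (by omega)

-- A's skip-else-append loop is a filter on the negated predicate.
theorem skip_loop (P : String → Bool) (l acc : List String) :
    l.foldl (fun a g => if P g = true then a else a ++ [g]) acc
      = acc ++ l.filter (fun g => !P g) := by
  have h : (fun (a : List String) g => if P g = true then a else a ++ [g])
      = (fun (a : List String) g => if (!P g) = true then a ++ [g] else a) := by
    funext a g; cases hg : P g <;> simp
  rw [h, PySem.List.foldl_append_if_eq_filter]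

set_option maxHeartbeats 1000000 in
theorem clean_genres_spec : Claim_equal_clean_genres := by
  intro genres artist_name track_name album_name _
  unfold Spec_clean_genres clean_genres clean_genres_alt
  simp only
  -- rewrite A's loop as a single filter over genres
  rw [skip_loop (fun genre =>
      PySem.Str.isIn (PySem.Str.lower artist_name) (PySem.Str.lower genre) ||
      PySem.Str.isIn (PySem.Str.lower track_name) (PySem.Str.lower genre) ||
      PySem.Str.isIn (PySem.Str.lower album_name) (PySem.Str.lower genre) ||
      (PySem.Set.ofList (PySem.Str.split₀ (PySem.Str.lower artist_name))).any (fun word =>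
        decide (2 < PySem.Str.len word) && PySem.Str.isIn word (PySem.Str.lower genre)) ||
      (PySem.Set.ofList (PySem.Str.split₀ (PySem.Str.lower track_name))).any (fun word =>
        decide (2 < PySem.Str.len word) && PySem.Str.isIn word (PySem.Str.lower genre)) ||
      (PySem.Set.ofList (PySem.Str.split₀ (PySem.Str.lower album_name))).any (fun word =>
        decide (2 < PySem.Str.len word) && PySem.Str.isIn word (PySem.Str.lower genre)))
    genres []]
  simp only [List.nil_append]
  -- rewrite B's inner pattern sieve as one filter per name
  have hinner : (fun (survivors : List (String × String)) (name : String) =>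
      let n := PySem.Str.lower name
      ([n] ++ (PySem.Str.split₀ n).filter (fun w => decide (2 < PySem.Str.len w))).foldl
        (fun s pat => s.filter (fun p => !PySem.Str.isIn pat p.2)) survivors)
      = (fun survivors name => survivors.filter (fun p =>
          ([PySem.Str.lower name] ++ (PySem.Str.split₀ (PySem.Str.lower name)).filter
              (fun w => decide (2 < PySem.Str.len w))).all
            (fun pat => !PySem.Str.isIn pat p.2))) := by
    funext survivors name
    exact foldl_filter _ _ _
  rw [hinner]
  -- rewrite B's outer name sieve as one filter, push it through the map, drop the pairing
  rw [foldl_filter, List.filter_map, List.map_map]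
  simp only [Function.comp_def]
  -- now both sides are a filter over genres followed by (or already equal to) the identity map
  rw [List.map_id']
  apply List.filter_congr
  intro g _
  -- per-genre boolean equivalence of the two predicates
  simp only [List.all_cons, List.all_nil, Bool.and_true, block_eq]
  simp only [Bool.not_or]
  ac_rfl
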